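-- pv_equiv track=rewrite | github.com/hojak/py_advent2024 | src/day19/tools.py | count_all_solutions
-- ===== SOURCE A (Python) =====
-- def is_pattern_possible (pattern, available):
--     if len(pattern) == 0:
--         return True
--
--     for towel in available:
--         if ( len(towel) <= len(pattern) and pattern[:len(towel)] == towel):
--             if ( is_pattern_possible(pattern[len(towel):], available)):
--                 return True
--
--     return False
--
-- def count_possible_solutions (pattern, available):
--     if len(pattern) == 0:
--         return 1
--     elif ( not is_pattern_possible(pattern, available)):
--         return 0
--     elif ( pattern in __seen_patterns):
--         return __seen_patterns[pattern]
--
--     result = 0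
--     for towel in available:
--         if ( len(towel) <= len(pattern) and pattern[:len(towel)] == towel):
--             result += count_possible_solutions(pattern[len(towel):], available)
--
--     __seen_patterns[pattern] = result
--
--     return result
--
-- __seen_patterns ={}
--
-- def count_all_solutions( patterns, towels):
--     seen_patters = {}
--
--     result = 0
--     count = 0
--     for pattern in patterns:
--         result += count_possible_solutions(pattern, towels)
--         count +=1
--
--     return result
-- ===== SOURCE B (Python) =====
-- def count_all_solutions(patterns, towels):
--     total = 0
--     for pattern in patterns:
--         n = len(pattern)
--         ways = [0] * (n + 1)
--         ways[n] = 1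
--         for i in range(n - 1, -1, -1):
--             ways[i] = sum(ways[i + len(t)] for t in towels if pattern.startswith(t, i))
--         total += ways[0]
--     return total
-- ===== Notes on version B (the rewrite author's own statement) =====
-- stated objective: faster
-- what changed: Replaces A's top-down memoized recursion guarded by an exponential is_pattern_possible feasibility search with a bottom-up suffix DP array per pattern (ways[i] = decompositions of pattern[i:]), which yields 0 for impossible patterns without any feasibility pre-check.
import Mathlib
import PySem

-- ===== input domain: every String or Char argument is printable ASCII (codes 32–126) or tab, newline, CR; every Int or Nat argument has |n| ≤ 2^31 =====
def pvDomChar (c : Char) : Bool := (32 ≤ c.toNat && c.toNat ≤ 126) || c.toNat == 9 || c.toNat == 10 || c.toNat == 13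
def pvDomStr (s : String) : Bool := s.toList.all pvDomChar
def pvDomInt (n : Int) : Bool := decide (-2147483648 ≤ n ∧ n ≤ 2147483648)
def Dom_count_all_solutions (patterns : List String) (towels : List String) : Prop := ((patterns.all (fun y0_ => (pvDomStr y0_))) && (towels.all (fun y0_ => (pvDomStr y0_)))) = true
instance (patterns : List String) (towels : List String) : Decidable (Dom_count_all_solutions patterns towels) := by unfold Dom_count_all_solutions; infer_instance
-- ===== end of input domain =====

-- B replaces A's memoized top-down recursion guarded by an exponential feasibility
-- search (is_pattern_possible) with a bottom-up suffix DP per pattern; equivalence is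
-- claimed on inputs where A terminates (no empty towel alongside a nonempty pattern).

-- ===== PORT A =====
-- fuel makes A's unbounded recursion total in Lean; inside Pre_ the fuel
-- (pattern length + 1) is never exhausted, so the port computes exactly A.
def ippA (fuel : Nat) (tw : List (List Char)) (p : List Char) : Bool :=
  match fuel with
  | 0 => false
  | f + 1 =>
    if p.length = 0 then true
    else tw.any (fun t =>
      decide (t.length ≤ p.length) && (p.take t.length == t) && ippA f tw (p.drop t.length))

mutual
def cpsA (fuel : Nat) (tw : List (List Char)) (p : List Char)
    (memo : PySem.Dict (List Char) Int) : Int × PySem.Dict (List Char) Int :=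
  match fuel with
  | 0 => (0, memo)
  | f + 1 =>
    if p.length = 0 then (1, memo)
    else if ippA (p.length + 1) tw p = false then (0, memo)
    else
      match memo.get? p with
      | some v => (v, memo)
      | none =>
        let st := cpsLoop f tw p tw 0 memo
        (st.1, st.2.insert p st.1)
termination_by (fuel, 0)

def cpsLoop (f : Nat) (tw : List (List Char)) (p : List Char) (l : List (List Char))
    (acc : Int) (memo : PySem.Dict (List Char) Int) : Int × PySem.Dict (List Char) Int :=
  match l with
  | [] => (acc, memo)
  | t :: rest =>
    if t.length ≤ p.length ∧ p.take t.length = t then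
      let r := cpsA f tw (p.drop t.length) memo
      cpsLoop f tw p rest (acc + r.1) r.2
    else cpsLoop f tw p rest acc memo
termination_by (f, l.length + 1)
end

def count_all_solutions (patterns : List String) (towels : List String) : Int :=
  let tw := towels.map String.toList
  (patterns.foldl
    (fun (st : Int × PySem.Dict (List Char) Int) s =>
      let r := cpsA (s.toList.length + 1) tw s.toList st.2
      (st.1 + r.1, r.2))
    (0, PySem.Dict.empty)).1

-- ===== PORT B =====
-- ways for all suffixes of p, front to back: (waysB tw p).getD i 0 = #decompositions of p.drop i
def waysB (tw : List (List Char)) : List Char → List Int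
  | [] => [1]
  | c :: rest =>
    let ws := waysB tw rest
    (tw.foldl (fun acc t =>
        acc + (if t.isPrefixOf (c :: rest) then (0 :: ws).getD t.length 0 else 0)) 0) :: ws

def count_all_solutions_alt (patterns : List String) (towels : List String) : Int :=
  let tw := towels.map String.toList
  patterns.foldl (fun total s => total + (waysB tw s.toList).getD 0 0) 0

-- ===== PRECONDITION & SPEC =====
-- Pre_ excludes exactly the inputs where A raises RecursionError: an empty towel
-- together with at least one nonempty pattern (A recurses forever on the same pattern).
def Pre_count_all_solutions (patterns : List String) (towels : List String) : Prop :=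
  "" ∈ towels → ∀ p ∈ patterns, p = ""
instance (patterns : List String) (towels : List String) : Decidable (Pre_count_all_solutions patterns towels) := by unfold Pre_count_all_solutions; infer_instance

def pvWitness_count_all_solutions : List String × List String := (["ab", "a"], ["a", "b"])

def Spec_count_all_solutions (patterns : List String) (towels : List String) (out : Int) : Prop := out = count_all_solutions_alt patterns towels
instance (patterns : List String) (towels : List String) (out : Int) : Decidable (Spec_count_all_solutions patterns towels out) := by unfold Spec_count_all_solutions; infer_instance

-- ===== CLAIM (what is proved, stated in full; the proofs are below) =====
def Claim_equal_count_all_solutions : Prop := ∀ (patterns : List String) (towels : List String), Dom_count_all_solutions patterns towels → Pre_count_all_solutions patterns towels → Spec_count_all_solutions patterns towels (count_all_solutions patterns towels)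

-- ===== LEMMAS AND PROOFS =====

-- W tw p: the number B computes for pattern p
def W (tw : List (List Char)) (p : List Char) : Int := (waysB tw p).getD 0 0

-- memo invariant: every stored value is the true count
def GoodM (tw : List (List Char)) (memo : PySem.Dict (List Char) Int) : Prop :=
  ∀ k v, memo.get? k = some v → v = W tw k

lemma getD_waysB (tw : List (List Char)) :
    ∀ (p : List Char) (j : Nat), j ≤ p.length → (waysB tw p).getD j 0 = W tw (p.drop j) := by
  intro p
  induction p with
  | nil =>
    intro j hj
    have hj0 : j = 0 := by simpa using hj
    subst hj0; rfl
  | cons c rest ih =>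
    intro j hj
    cases j with
    | zero => rfl
    | succ j =>
      have h1 : (waysB tw (c :: rest)).getD (j + 1) 0 = (waysB tw rest).getD j 0 := by
        simp [waysB]
      rw [h1, ih j (by simpa using hj)]
      rfl

lemma prefix_if_eq (tw : List (List Char)) (htw : [] ∉ tw) (c : Char) (rest : List Char)
    (t : List Char) (ht : t ∈ tw) :
    (if t.isPrefixOf (c :: rest) = true then (0 :: waysB tw rest).getD t.length 0 else 0)
      = (if t.length ≤ (c :: rest).length ∧ (c :: rest).take t.length = t
         then W tw ((c :: rest).drop t.length) else 0) := by
  have htne : t ≠ [] := fun h => htw (h ▸ ht)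
  by_cases hpre : t <+: (c :: rest)
  · have hb : t.isPrefixOf (c :: rest) = true := List.isPrefixOf_iff_prefix.2 hpre
    have hlen : t.length ≤ (c :: rest).length := hpre.length_le
    have htake : (c :: rest).take t.length = t := (List.prefix_iff_eq_take.1 hpre).symm
    rw [hb, if_pos rfl, if_pos ⟨hlen, htake⟩]
    obtain ⟨m, hm⟩ := Nat.exists_eq_succ_of_ne_zero
      (fun h => htne (List.length_eq_zero_iff.1 h))
    rw [hm, List.getD_cons_succ]
    have hmle : m ≤ rest.length := by
      rw [hm] at hlen; simpa using hlen
    rw [getD_waysB tw rest m hmle]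
    have hd : (c :: rest).drop (m + 1) = rest.drop m := by simp
    rw [hd]
  · have hb : t.isPrefixOf (c :: rest) = false := by
      rw [Bool.eq_false_iff]
      intro h; exact hpre (List.isPrefixOf_iff_prefix.1 h)
    have hcond : ¬ (t.length ≤ (c :: rest).length ∧ (c :: rest).take t.length = t) := by
      rintro ⟨h1, h2⟩
      exact hpre (h2 ▸ List.take_prefix t.length (c :: rest))
    rw [hb, if_neg (by simp), if_neg hcond]

lemma W_cons_aux (tw : List (List Char)) (htw : [] ∉ tw) (c : Char) (rest : List Char) :
    ∀ (l : List (List Char)) (a : Int), (∀ t ∈ l, t ∈ tw) →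
      l.foldl (fun acc t =>
          acc + (if t.isPrefixOf (c :: rest) then (0 :: waysB tw rest).getD t.length 0 else 0)) a
        = a + (l.map (fun t =>
            if t.length ≤ (c :: rest).length ∧ (c :: rest).take t.length = t
            then W tw ((c :: rest).drop t.length) else 0)).sum := by
  intro l
  induction l with
  | nil => intro a _; simp
  | cons t ts ih =>
    intro a hmem
    simp only [List.foldl_cons, List.map_cons, List.sum_cons]
    rw [ih _ (fun u hu => hmem u (List.mem_cons_of_mem _ hu)),
      prefix_if_eq tw htw c rest t (hmem t (List.mem_cons_self ..))]
    ring

lemma W_cons (tw : List (List Char)) (htw : [] ∉ tw) (c : Char) (rest : List Char) :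
    W tw (c :: rest)
      = (tw.map (fun t =>
          if t.length ≤ (c :: rest).length ∧ (c :: rest).take t.length = t
          then W tw ((c :: rest).drop t.length) else 0)).sum := by
  have hW : W tw (c :: rest)
      = tw.foldl (fun acc t =>
          acc + (if t.isPrefixOf (c :: rest) then (0 :: waysB tw rest).getD t.length 0 else 0)) 0 := by
    simp [W, waysB]
  rw [hW, W_cons_aux tw htw c rest tw 0 (fun t ht => ht), zero_add]

lemma ipp_false (tw : List (List Char)) (htw : [] ∉ tw) :
    ∀ (fuel : Nat) (p : List Char), p.length < fuel → ippA fuel tw p = false → W tw p = 0 := by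
  intro fuel
  induction fuel with
  | zero => intro p hp; omega
  | succ f ih =>
    intro p hp hfalse
    cases p with
    | nil => simp [ippA] at hfalse
    | cons c rest =>
      rw [W_cons tw htw]
      apply List.sum_eq_zero
      intro x hx
      simp only [List.mem_map] at hx
      obtain ⟨t, ht, rfl⟩ := hx
      split_ifs with hcond
      · have htne : t ≠ [] := fun h => htw (h ▸ ht)
        have htl : 1 ≤ t.length := by
          cases t with
          | nil => exact absurd rfl htne
          | cons a b => simp
        rw [show ippA (f + 1) tw (c :: rest)
              = tw.any (fun t => decide (t.length ≤ (c :: rest).length)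
                  && ((c :: rest).take t.length == t) && ippA f tw ((c :: rest).drop t.length))
            from by simp [ippA]] at hfalse
        rw [List.any_eq_false] at hfalse
        have hb := hfalse t ht
        have hipp : ippA f tw ((c :: rest).drop t.length) = false := by
          by_contra hcontra
          apply hb
          rw [Bool.and_eq_true, Bool.and_eq_true]
          refine ⟨⟨decide_eq_true hcond.1, ?_⟩, ?_⟩
          · exact beq_iff_eq.2 hcond.2
          · simpa using hcontra
        apply ih _ _ hipp
        simp only [List.length_drop, List.length_cons] at *
        omega
      · rfl

lemma good_empty (tw : List (List Char)) : GoodM tw PySem.Dict.empty := by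
  intro k v h
  simp [PySem.Dict.get?_empty] at h

lemma cps_loop (tw : List (List Char)) (htw : [] ∉ tw) (f : Nat) (p : List Char)
    (hp : p ≠ []) (hplen : p.length ≤ f)
    (IH : ∀ (q : List Char) (memo : PySem.Dict (List Char) Int), q.length < f → GoodM tw memo →
      (cpsA f tw q memo).1 = W tw q ∧ GoodM tw (cpsA f tw q memo).2) :
    ∀ (l : List (List Char)) (acc : Int) (memo : PySem.Dict (List Char) Int),
      (∀ t ∈ l, t ∈ tw) → GoodM tw memo →
      (cpsLoop f tw p l acc memo).1
        = acc + (l.map (fun t =>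
            if t.length ≤ p.length ∧ p.take t.length = t then W tw (p.drop t.length) else 0)).sum
      ∧ GoodM tw (cpsLoop f tw p l acc memo).2 := by
  intro l
  induction l with
  | nil =>
    intro acc memo _ hg
    rw [show cpsLoop f tw p [] acc memo = (acc, memo) from by simp [cpsLoop]]
    simpa using hg
  | cons t rest ihl =>
    intro acc memo hmem hg
    have hrest : ∀ u ∈ rest, u ∈ tw := fun u hu => hmem u (List.mem_cons_of_mem _ hu)
    by_cases hc : t.length ≤ p.length ∧ p.take t.length = t
    · have htne : t ≠ [] := fun h => htw (h ▸ hmem t (List.mem_cons_self ..))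
      have htl : 1 ≤ t.length := by
        cases t with
        | nil => exact absurd rfl htne
        | cons a b => simp
      have hp1 : 1 ≤ p.length := by
        cases p with
        | nil => exact absurd rfl hp
        | cons a b => simp
      have hdrop : (p.drop t.length).length < f := by
        simp only [List.length_drop]; omega
      obtain ⟨h1, h2⟩ := IH (p.drop t.length) memo hdrop hg
      rw [show cpsLoop f tw p (t :: rest) acc memo
            = cpsLoop f tw p rest (acc + (cpsA f tw (p.drop t.length) memo).1)
                (cpsA f tw (p.drop t.length) memo).2
          from by simp [cpsLoop, hc]]
      obtain ⟨h3, h4⟩ := ihl (acc + (cpsA f tw (p.drop t.length) memo).1) _ hrest h2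
      refine ⟨?_, h4⟩
      rw [h3, h1, List.map_cons, List.sum_cons, if_pos hc]
      ring
    · rw [show cpsLoop f tw p (t :: rest) acc memo = cpsLoop f tw p rest acc memo
          from by simp [cpsLoop, hc]]
      obtain ⟨h3, h4⟩ := ihl acc memo hrest hg
      refine ⟨?_, h4⟩
      rw [h3, List.map_cons, List.sum_cons, if_neg hc, zero_add]

lemma cps_correct (tw : List (List Char)) (htw : [] ∉ tw) :
    ∀ (fuel : Nat) (p : List Char) (memo : PySem.Dict (List Char) Int),
      p.length < fuel → GoodM tw memo →
      (cpsA fuel tw p memo).1 = W tw p ∧ GoodM tw (cpsA fuel tw p memo).2 := by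
  intro fuel
  induction fuel with
  | zero => intro p memo hp; omega
  | succ f ih =>
    intro p memo hp hg
    by_cases hp0 : p.length = 0
    · have hpn : p = [] := List.length_eq_zero_iff.1 hp0
      subst hpn
      rw [show cpsA (f + 1) tw [] memo = (1, memo) from by simp [cpsA]]
      exact ⟨rfl, hg⟩
    · by_cases hippf : ippA (p.length + 1) tw p = false
      · rw [show cpsA (f + 1) tw p memo = (0, memo)
            from by simp [cpsA, hp0, hippf]]
        exact ⟨(ipp_false tw htw (p.length + 1) p (by omega) hippf).symm, hg⟩
      · cases hm : memo.get? p with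
        | some v =>
          rw [show cpsA (f + 1) tw p memo = (v, memo)
              from by simp [cpsA, hp0, hippf, hm]]
          exact ⟨hg p v hm, hg⟩
        | none =>
          have hpne : p ≠ [] := fun h => hp0 (by simp [h])
          have hplen : p.length ≤ f := by omega
          obtain ⟨h1, h2⟩ := cps_loop tw htw f p hpne hplen ih tw 0 memo (fun t ht => ht) hg
          rw [show cpsA (f + 1) tw p memo
                = ((cpsLoop f tw p tw 0 memo).1,
                   (cpsLoop f tw p tw 0 memo).2.insert p (cpsLoop f tw p tw 0 memo).1)
              from by simp [cpsA, hp0, hippf, hm]]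
          have hval : (cpsLoop f tw p tw 0 memo).1 = W tw p := by
            cases p with
            | nil => exact absurd rfl hpne
            | cons c rest => rw [h1, zero_add, W_cons tw htw]
          refine ⟨hval, ?_⟩
          intro k v hkv
          rw [PySem.Dict.get?_insert] at hkv
          split_ifs at hkv with hk
          · subst hk
            rw [← Option.some.inj hkv, hval]
          · exact h2 k v hkv

lemma main_fold (tw : List (List Char)) :
    ∀ (pats : List String) (acc : Int) (memo : PySem.Dict (List Char) Int),
      GoodM tw memo → (∀ s ∈ pats, s.toList = [] ∨ [] ∉ tw) →
      (pats.foldl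
        (fun (st : Int × PySem.Dict (List Char) Int) s =>
          let r := cpsA (s.toList.length + 1) tw s.toList st.2
          (st.1 + r.1, r.2)) (acc, memo)).1
        = pats.foldl (fun total s => total + (waysB tw s.toList).getD 0 0) acc := by
  intro pats
  induction pats with
  | nil => intro acc memo _ _; rfl
  | cons s rest ih =>
    intro acc memo hg hcond
    have hcr : ∀ u ∈ rest, u.toList = [] ∨ [] ∉ tw :=
      fun u hu => hcond u (List.mem_cons_of_mem _ hu)
    have hstep : (cpsA (s.toList.length + 1) tw s.toList memo).1 = (waysB tw s.toList).getD 0 0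
        ∧ GoodM tw (cpsA (s.toList.length + 1) tw s.toList memo).2 := by
      rcases hcond s (List.mem_cons_self ..) with hnil | htw
      · rw [hnil]
        rw [show cpsA (List.length ([] : List Char) + 1) tw [] memo = (1, memo)
            from by simp [cpsA]]
        exact ⟨rfl, hg⟩
      · obtain ⟨h1, h2⟩ := cps_correct tw htw (s.toList.length + 1) s.toList memo (by omega) hg
        exact ⟨h1, h2⟩
    simp only [List.foldl_cons]
    rw [ih _ _ hstep.2 hcr, hstep.1]

-- ===== VERDICT (by name: the statement is the Claim_ definition above) =====
theorem count_all_solutions_spec : Claim_equal_count_all_solutions := by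
  intro patterns towels _ hpre
  unfold Spec_count_all_solutions count_all_solutions count_all_solutions_alt
  dsimp only
  apply main_fold
  · exact good_empty _
  · intro s hs
    by_cases hemp : "" ∈ towels
    · exact Or.inl (String.toList_eq_nil_iff.2 (hpre hemp s hs))
    · refine Or.inr fun hmem => ?_
      obtain ⟨x, hx, hx2⟩ := List.mem_map.1 hmem
      exact hemp (((String.toList_eq_nil_iff.1 hx2) : x = "") ▸ hx)
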